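-- pv_equiv track=rewrite | github.com/Andrew8xx8/maschine | pad_trainer.py | _print_beat_ruler
-- ===== SOURCE A (Python) =====
-- def _print_beat_ruler(steps, subdivisions=4, label_width=14):
--     """Print beat numbers above pattern"""
--     pad = ' ' * (label_width + 2)
--     nums = []
--     for s in range(steps):
--         if s > 0 and s % subdivisions == 0:
--             nums.append(' ')
--         if s % subdivisions == 0:
--             nums.append(str(s // subdivisions + 1))
--         else:
--             nums.append(' ')
--     return f"{pad} {' '.join(nums)}"
-- ===== SOURCE B (Python) =====
-- def _print_beat_ruler(steps, subdivisions=4, label_width=14):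
--     """Print beat numbers above pattern"""
--     nbeats = -(-steps // subdivisions) if steps > 0 else 0
--     ruler = ''
--     for b in range(nbeats):
--         sep = '   ' if b > 0 else ''
--         size = min(subdivisions, steps - b * subdivisions)
--         ruler += sep + str(b + 1) + '  ' * (size - 1)
--     return ' ' * (label_width + 2) + ' ' + ruler
-- ===== Notes on version B (the rewrite author's own statement) =====
-- stated objective: faster
-- what changed: A loops over every step emitting one token per step plus separator tokens and space-joins the token list; B computes the beat count by ceiling division and loops once per beat, appending the beat label and the whole beat group's space run as one bulk string operation. Pre_ excludes steps > 0 with subdivisions <= 0: there A raises ZeroDivisionError (subdivisions == 0) or emits accidental floor-division labels 1, 0, -1, ... (subdivisions < 0), a corner no caller would specify; B raises or returns an empty ruler there.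
-- outside the precondition, e.g. on _print_beat_ruler(5, -2, 0): A returns '   1     0     -1', B returns '   '
import Mathlib
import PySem

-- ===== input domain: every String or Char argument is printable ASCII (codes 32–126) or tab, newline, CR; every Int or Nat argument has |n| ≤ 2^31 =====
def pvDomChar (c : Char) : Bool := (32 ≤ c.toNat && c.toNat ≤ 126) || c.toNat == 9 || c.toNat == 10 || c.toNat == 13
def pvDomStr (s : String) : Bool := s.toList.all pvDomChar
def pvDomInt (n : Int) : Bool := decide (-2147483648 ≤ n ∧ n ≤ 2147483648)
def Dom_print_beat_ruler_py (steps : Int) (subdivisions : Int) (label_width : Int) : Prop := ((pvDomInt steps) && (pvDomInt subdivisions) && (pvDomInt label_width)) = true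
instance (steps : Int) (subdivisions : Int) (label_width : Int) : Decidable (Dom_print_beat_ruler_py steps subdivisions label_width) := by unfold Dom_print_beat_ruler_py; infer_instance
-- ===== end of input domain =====

-- B replaces A's per-step token loop + ' '.join by a per-beat loop (beat count by ceiling
-- division) that appends each beat's label and its space run in bulk; same return value.

-- ===== PORT A =====
def print_beat_ruler_py (steps : Int) (subdivisions : Int) (label_width : Int) : String :=
  let pad : List Char := PySem.List.pyRepeat [' '] (label_width + 2)
  let nums : List (List Char) :=
    (PySem.List.pyRange 0 steps 1).foldl
      (fun nums s =>
        let nums := if s > 0 ∧ PySem.Int.mod s subdivisions = 0 then nums ++ [[' ']] else nums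
        if PySem.Int.mod s subdivisions = 0 then
          nums ++ [PySem.Int.toChars (PySem.Int.floordiv s subdivisions + 1)]
        else nums ++ [[' ']]) []
  String.ofList (pad ++ [' '] ++ PySem.Chars.join [' '] nums)

-- ===== PORT B =====
def print_beat_ruler_py_alt (steps : Int) (subdivisions : Int) (label_width : Int) : String :=
  let nbeats : Int := if steps > 0 then -(PySem.Int.floordiv (-steps) subdivisions) else 0
  let ruler : List Char :=
    (PySem.List.pyRange 0 nbeats 1).foldl
      (fun ruler b =>
        let sep : List Char := if b > 0 then [' ', ' ', ' '] else []
        let size : Int := min subdivisions (steps - b * subdivisions)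
        ruler ++ sep ++ PySem.Int.toChars (b + 1)
          ++ PySem.List.pyRepeat [' ', ' '] (size - 1)) []
  String.ofList (PySem.List.pyRepeat [' '] (label_width + 2) ++ [' '] ++ ruler)

-- ===== PRECONDITION & SPEC =====
-- Pre_ excludes steps > 0 with subdivisions ≤ 0: there A raises ZeroDivisionError
-- (subdivisions = 0) or emits accidental floor-division labels 1, 0, -1, …
-- (subdivisions < 0), a corner no caller would specify.
def Pre_print_beat_ruler_py (steps : Int) (subdivisions : Int) (label_width : Int) : Prop :=
  steps ≤ 0 ∨ subdivisions > 0
instance (steps : Int) (subdivisions : Int) (label_width : Int) : Decidable (Pre_print_beat_ruler_py steps subdivisions label_width) := by unfold Pre_print_beat_ruler_py; infer_instance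
def pvWitness_print_beat_ruler_py : Int × Int × Int := (9, 4, 14)

def Spec_print_beat_ruler_py (steps : Int) (subdivisions : Int) (label_width : Int) (out : String) : Prop := out = print_beat_ruler_py_alt steps subdivisions label_width
instance (steps : Int) (subdivisions : Int) (label_width : Int) (out : String) : Decidable (Spec_print_beat_ruler_py steps subdivisions label_width out) := by unfold Spec_print_beat_ruler_py; infer_instance

-- ===== CLAIM (what is proved, stated in full; the proofs are below) =====
def Claim_equal_print_beat_ruler_py : Prop := ∀ (steps : Int) (subdivisions : Int) (label_width : Int), Dom_print_beat_ruler_py steps subdivisions label_width → Pre_print_beat_ruler_py steps subdivisions label_width → Spec_print_beat_ruler_py steps subdivisions label_width (print_beat_ruler_py steps subdivisions label_width)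
-- ===== LEMMAS AND PROOFS =====

-- the label A prints at step s
def pvLab (sd s : Int) : List Char := PySem.Int.toChars (PySem.Int.floordiv s sd + 1)

-- tokens A appends for step s
def pvGA (sd s : Int) : List (List Char) :=
  (if s > 0 ∧ PySem.Int.mod s sd = 0 then [[' ']] else []) ++
  (if PySem.Int.mod s sd = 0 then [pvLab sd s] else [[' ']])

-- characters B appends for beat b
def pvGB (steps sd b : Int) : List Char :=
  (if b > 0 then [' ', ' ', ' ']  else []) ++ PySem.Int.toChars (b + 1) ++
  List.replicate (2 * (min sd (steps - b * sd) - 1).toNat) ' '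

theorem pvRep2 (n : Int) : PySem.List.pyRepeat [' ', ' '] n = List.replicate (2 * n.toNat) ' ' := by
  simp only [PySem.List.pyRepeat]
  induction n.toNat with
  | zero => rfl
  | succ k ih =>
    have h2 : 2 * (k + 1) = 2 * k + 1 + 1 := by ring
    simp only [List.replicate_succ, List.flatten_cons, ih, h2]
    rfl

theorem pvFoldA (steps sd : Int) :
    (PySem.List.pyRange 0 steps 1).foldl
      (fun nums s =>
        let nums := if s > 0 ∧ PySem.Int.mod s sd = 0 then nums ++ [[' ']] else nums
        if PySem.Int.mod s sd = 0 then
          nums ++ [PySem.Int.toChars (PySem.Int.floordiv s sd + 1)]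
        else nums ++ [[' ']]) [] = (PySem.List.pyRange 0 steps 1).flatMap (pvGA sd) := by
  rw [PySem.List.foldl_congr_mem _ _ (fun acc s => acc ++ pvGA sd s)]
  · exact PySem.List.foldl_append_eq_flatMap _ _ _
  · intro acc x _
    simp only [pvGA, pvLab]
    split_ifs <;> simp

theorem pvFoldB (steps sd N : Int) :
    (PySem.List.pyRange 0 N 1).foldl
      (fun ruler b =>
        let sep : List Char := if b > 0 then [' ', ' ', ' '] else []
        let size : Int := min sd (steps - b * sd)
        ruler ++ sep ++ PySem.Int.toChars (b + 1)
          ++ PySem.List.pyRepeat [' ', ' '] (size - 1)) [] =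
    (PySem.List.pyRange 0 N 1).flatMap (pvGB steps sd) := by
  rw [PySem.List.foldl_congr_mem _ _ (fun acc b => acc ++ pvGB steps sd b)]
  · exact PySem.List.foldl_append_eq_flatMap _ _ _
  · intro acc b _
    simp only [pvGB, pvRep2]
    split_ifs <;> simp

theorem pvFlatMapConst {α : Type} (g : α → List (List Char)) (c : List Char) :
    ∀ (l : List α), (∀ x ∈ l, g x = [c]) → l.flatMap g = List.replicate l.length c := by
  intro l
  induction l with
  | nil => simp
  | cons x t ih =>
    intro h
    simp [h x (by simp), ih (fun y hy => h y (by simp [hy])), List.replicate_succ]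

theorem pvNotDvdBetween (m b s : Int) (hm : 0 < m) (h1 : b * m < s) (h2 : s < (b + 1) * m) :
    ¬ m ∣ s := by
  rintro ⟨k, rfl⟩
  have hb : b < k := lt_of_mul_lt_mul_left (by linarith [mul_comm m k, mul_comm b m]) (le_of_lt hm)
  have hk : k < b + 1 := lt_of_mul_lt_mul_left (by linarith [mul_comm m k, mul_comm (b+1) m]) (le_of_lt hm)
  omega

theorem pvLabMul (sd b : Int) (hm0 : 0 < sd) : pvLab sd (b * sd) = PySem.Int.toChars (b + 1) := by
  unfold pvLab
  rw [(PySem.Int.floordiv_eq_iff_of_pos hm0).mpr ⟨le_refl _, by nlinarith⟩]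

theorem pvGA_start (sd b : Int) (hm0 : 0 < sd) (hb : 0 ≤ b) :
    pvGA sd (b * sd) = (if b > 0 then [[' ']] else []) ++ [pvLab sd (b * sd)] := by
  have hdvd : PySem.Int.mod (b * sd) sd = 0 := by
    rw [PySem.Int.mod_eq_zero_iff_dvd]
    exact Dvd.dvd.mul_left dvd_rfl b
  have hpos : b * sd > 0 ↔ b > 0 := by
    constructor
    · intro h; by_contra hc; push_neg at hc; nlinarith
    · intro h; positivity
  simp only [pvGA, hdvd, hpos]
  split_ifs <;> simp_all

-- one beat group of A's token list
theorem pvTokensGroup (steps sd b : Int) (hm0 : 0 < sd) (hb : 0 ≤ b)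
    (hlt : b * sd < steps) :
    (PySem.List.pyRange (b * sd) steps 1).flatMap (pvGA sd) =
      pvGA sd (b * sd) ++ List.replicate (min ((b + 1) * sd) steps - (b * sd + 1)).toNat [' '] ++
      (PySem.List.pyRange ((b + 1) * sd) steps 1).flatMap (pvGA sd) := by
  have he1 : b * sd + 1 ≤ min ((b + 1) * sd) steps := by
    have : b * sd + sd ≤ (b + 1) * sd := by ring_nf; omega
    omega
  have he2 : min ((b + 1) * sd) steps ≤ steps := min_le_right _ _
  rw [PySem.List.pyRange_one_cons hlt,
      PySem.List.pyRange_one_append (b * sd + 1) (min ((b + 1) * sd) steps) steps he1 he2]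
  have hmid : (PySem.List.pyRange (b * sd + 1) (min ((b + 1) * sd) steps) 1).flatMap (pvGA sd) =
      List.replicate (min ((b + 1) * sd) steps - (b * sd + 1)).toNat [' '] := by
    rw [pvFlatMapConst (pvGA sd) [' '] _ ?_, PySem.List.length_pyRange_one]
    intro s hs
    rw [PySem.List.mem_pyRange_one] at hs
    have hnd : ¬ PySem.Int.mod s sd = 0 := by
      rw [PySem.Int.mod_eq_zero_iff_dvd]
      intro h
      exact pvNotDvdBetween sd b s hm0 (by omega) (by omega) h
    simp [pvGA, hnd]
  have htail : (PySem.List.pyRange (min ((b + 1) * sd) steps) steps 1).flatMap (pvGA sd) =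
      (PySem.List.pyRange ((b + 1) * sd) steps 1).flatMap (pvGA sd) := by
    rcases le_or_gt ((b + 1) * sd) steps with h | h
    · rw [min_eq_left h]
    · rw [min_eq_right (le_of_lt h), PySem.List.pyRange_one_eq_nil le_rfl,
          PySem.List.pyRange_one_eq_nil (le_of_lt h)]
  simp only [List.flatMap_cons, List.flatMap_append, hmid, htail, List.append_assoc]

theorem pvJoinHead : ∀ (k : Nat) (x : List Char) (T : List (List Char)),
    PySem.Chars.join [' '] (x :: (List.replicate k [' '] ++ T)) =
      x ++ List.replicate (2 * k) ' ' ++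
        (if T = [] then [] else ' ' :: PySem.Chars.join [' '] T) := by
  intro k
  induction k with
  | zero =>
    intro x T
    cases T with
    | nil => simp [PySem.Chars.join_singleton]
    | cons y t => simp [PySem.Chars.join_cons_cons]
  | succ k ih =>
    intro x T
    have : (2 : Nat) * (k + 1) = 2 * k + 2 := by ring
    rw [List.replicate_succ, List.cons_append, PySem.Chars.join_cons_cons, ih, this]
    simp only [List.append_assoc, List.singleton_append]
    rw [show (2:Nat) * k + 2 = 2 * k + 1 + 1 from by ring]
    simp only [List.replicate_succ, List.cons_append]

theorem pvGA_ne_nil (sd s : Int) : pvGA sd s ≠ [] := by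
  simp only [pvGA]; split_ifs <;> simp

theorem pvSz (steps m b : Int) (hm0 : 0 < m) (hlt : b * m < steps) :
    (min m (steps - b * m) - 1).toNat = (min ((b + 1) * m) steps - (b * m + 1)).toNat := by
  have : (b + 1) * m = b * m + m := by ring
  rw [this]
  rcases le_total m (steps - b * m) with h | h
  · rw [min_eq_left h, min_eq_left (by omega)]; omega
  · rw [min_eq_right h, min_eq_right (by omega)]; omega

-- main induction: from beat b ≥ 1 on, one leading blank plus A's joined tokens equal B's groups
theorem pvMain (steps sd N : Int) (hm0 : 0 < sd)
    (hNle : steps ≤ N * sd) (hNlt : ∀ b : Int, 0 ≤ b → (b < N ↔ b * sd < steps)) :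
    ∀ (cnt : Nat) (b : Int), 1 ≤ b → b < N → (N - b).toNat = cnt →
    [' '] ++ PySem.Chars.join [' '] ((PySem.List.pyRange (b * sd) steps 1).flatMap (pvGA sd)) =
      (PySem.List.pyRange b N 1).flatMap (pvGB steps sd) := by
  intro cnt
  induction cnt with
  | zero => intro b hb1 hbN hc; omega
  | succ k ih =>
    intro b hb1 hbN hc
    have hlt : b * sd < steps := (hNlt b (by omega)).mp hbN
    rw [pvTokensGroup steps sd b hm0 (by omega) hlt,
        pvGA_start sd b hm0 (by omega), if_pos (by omega : b > 0)]
    rw [PySem.List.pyRange_one_cons hbN]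
    simp only [List.flatMap_cons]
    simp only [List.cons_append, List.singleton_append, List.append_assoc, List.nil_append]
    rw [PySem.Chars.join_cons_cons, pvJoinHead]
    rcases eq_or_lt_of_le (by omega : b + 1 ≤ N) with hlast | hmore
    · have hemp : PySem.List.pyRange ((b + 1) * sd) steps 1 = [] :=
        PySem.List.pyRange_one_eq_nil (by rw [hlast]; omega)
      have hemp2 : PySem.List.pyRange (b + 1) N 1 = [] :=
        PySem.List.pyRange_one_eq_nil (by omega)
      simp [hemp, hemp2, pvGB, if_pos (by omega : b > 0), pvSz steps sd b hm0 hlt,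
        pvLabMul sd b hm0]
    · have hlt2 : (b + 1) * sd < steps := (hNlt (b + 1) (by omega)).mp hmore
      have hT : (PySem.List.pyRange ((b + 1) * sd) steps 1).flatMap (pvGA sd) ≠ [] := by
        rw [PySem.List.pyRange_one_cons hlt2]
        simp [pvGA_ne_nil]
      rw [if_neg hT]
      have := ih (b + 1) (by omega) hmore (by omega)
      simp only [List.singleton_append] at this
      simp only [pvGB, if_pos (by omega : b > 0), pvSz steps sd b hm0 hlt]
      rw [← this, pvLabMul sd b hm0]
      simp

theorem pvTop (steps sd N : Int) (hm0 : 0 < sd) (hs : 0 < steps)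
    (hNle : steps ≤ N * sd) (hNlt : ∀ b : Int, 0 ≤ b → (b < N ↔ b * sd < steps)) :
    PySem.Chars.join [' '] ((PySem.List.pyRange 0 steps 1).flatMap (pvGA sd)) =
      (PySem.List.pyRange 0 N 1).flatMap (pvGB steps sd) := by
  have hN0 : 0 < N := (hNlt 0 (le_refl 0)).mpr (by omega)
  rw [show PySem.List.pyRange 0 steps 1 = PySem.List.pyRange (0 * sd) steps 1 from by norm_num]
  rw [pvTokensGroup steps sd 0 hm0 le_rfl (by omega),
      pvGA_start sd 0 hm0 le_rfl, if_neg (by omega : ¬ (0:Int) > 0)]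
  rw [PySem.List.pyRange_one_cons hN0]
  simp only [List.flatMap_cons, List.nil_append, List.singleton_append, List.cons_append,
    List.append_assoc, zero_mul]
  rw [pvJoinHead]
  have hlab := pvLabMul sd 0 hm0
  rw [zero_mul] at hlab
  rcases eq_or_lt_of_le (by omega : (1 : Int) ≤ N) with hlast | hmore
  · have hle : steps ≤ 1 * sd := by rw [← hlast] at hNle; omega
    have hemp : PySem.List.pyRange ((0 + 1) * sd) steps 1 = [] :=
      PySem.List.pyRange_one_eq_nil (by omega)
    have hemp2 : PySem.List.pyRange (0 + 1) N 1 = [] :=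
      PySem.List.pyRange_one_eq_nil (by omega)
    rw [hemp, hemp2]
    have hsz := pvSz steps sd 0 hm0 (by omega : 0 * sd < steps)
    simp only [pvGB, if_neg (by omega : ¬ (0:Int) > 0), hsz, hlab]
    simp
  · have hlt2 : 1 * sd < steps := (hNlt 1 (by omega)).mp hmore
    have hT : (PySem.List.pyRange ((0 + 1) * sd) steps 1).flatMap (pvGA sd) ≠ [] := by
      rw [show ((0:Int) + 1) * sd = 1 * sd from by ring, PySem.List.pyRange_one_cons hlt2]
      simp [pvGA_ne_nil]
    rw [if_neg hT]
    have hMain := pvMain steps sd N hm0 hNle hNlt (N - 1).toNat 1 le_rfl hmore rfl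
    rw [show ((0:Int) + 1) * sd = 1 * sd from by ring, show (0:Int) + 1 = 1 from by ring]
    simp only [List.singleton_append] at hMain
    rw [← hMain]
    have hsz := pvSz steps sd 0 hm0 (by omega : 0 * sd < steps)
    simp only [pvGB, if_neg (by omega : ¬ (0:Int) > 0), hsz, hlab]
    simp

-- ===== VERDICT (by name: the statement is the Claim_ definition above) =====
theorem print_beat_ruler_py_spec : Claim_equal_print_beat_ruler_py := by
  intro steps sd lw _ hpre
  unfold Spec_print_beat_ruler_py print_beat_ruler_py print_beat_ruler_py_alt
  simp only []
  congr 1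
  rw [pvFoldA steps sd]
  rcases le_or_gt steps 0 with hle | hgt
  · have h1 : PySem.List.pyRange 0 steps 1 = [] := PySem.List.pyRange_one_eq_nil hle
    rw [if_neg (by omega : ¬ steps > 0)]
    simp [h1, PySem.Chars.join_nil]
  · have hm0 : (0:Int) < sd := by rcases hpre with h | h; omega; exact h
    rw [if_pos hgt, pvFoldB steps sd _]
    set N := -(PySem.Int.floordiv (-steps) sd) with hN
    have hbr : (N - 1) * sd < steps ∧ steps ≤ N * sd :=
      (PySem.Int.neg_floordiv_neg_eq_iff_of_pos hm0).mp hN.symm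
    have hNle : steps ≤ N * sd := hbr.2
    have hNlt : ∀ b : Int, 0 ≤ b → (b < N ↔ b * sd < steps) := by
      intro b hb
      constructor
      · intro h
        have h1 : b * sd ≤ (N - 1) * sd := mul_le_mul_of_nonneg_right (by omega) (by omega)
        omega
      · intro h
        have h2 : b * sd < N * sd := by omega
        exact lt_of_mul_lt_mul_right h2 (by omega)
    rw [pvTop steps sd N hm0 hgt hNle hNlt]
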